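-- pv_equiv track=rewrite | github.com/PetitCoinCoin/flipflop | 2025/puzzle_02.py | get_non_linear_max_height
-- ===== SOURCE A (Python) =====
-- def get_non_linear_max_height(rc: str) -> int:
--     height = 0
--     max_height = 0
--     previous_char = ""
--     delta = 0
--     for char in rc:
--         if char == previous_char:
--             delta += 1
--         else:
--             delta = 1
--         if char == "^":
--             height += delta
--         else:
--             height -= delta
--         max_height = max(height, max_height)
--         previous_char = char
--     return max_height
-- ===== SOURCE B (Python) =====
-- def get_non_linear_max_height(rc: str) -> int:
--     height = 0
--     max_height = 0
--     i = 0
--     n = len(rc)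
--     while i < n:
--         c = rc[i]
--         j = i + 1
--         while j < n and rc[j] == c:
--             j += 1
--         run_len = j - i
--         total = run_len * (run_len + 1) // 2
--         if c == "^":
--             height += total
--             max_height = max(max_height, height)
--         else:
--             max_height = max(max_height, height - 1)
--             height -= total
--         i = j
--     return max_height
-- ===== Notes on version B (the rewrite author's own statement) =====
-- stated objective: alternative
-- what changed: B iterates over maximal runs of identical characters and applies the closed-form triangular sum L*(L+1)//2 per run (peak = end height for '^' runs, height-1 for descending runs), instead of A's per-character loop tracking previous_char and an incrementing delta.
import Mathlib
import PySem

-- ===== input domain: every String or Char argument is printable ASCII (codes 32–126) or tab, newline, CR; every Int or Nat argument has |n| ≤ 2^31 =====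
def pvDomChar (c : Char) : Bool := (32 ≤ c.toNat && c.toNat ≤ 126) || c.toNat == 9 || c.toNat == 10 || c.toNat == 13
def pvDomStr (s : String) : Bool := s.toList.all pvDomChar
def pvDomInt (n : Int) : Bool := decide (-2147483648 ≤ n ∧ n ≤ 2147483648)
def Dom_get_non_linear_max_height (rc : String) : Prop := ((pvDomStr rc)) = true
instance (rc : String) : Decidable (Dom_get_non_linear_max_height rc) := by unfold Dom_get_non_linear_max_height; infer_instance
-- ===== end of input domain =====

-- B replaces A's per-character delta/previous_char loop by a run-at-a-time scan using the
-- closed-form triangular sum per run (objective: alternative decomposition, same O(n) cost).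

-- ===== PORT A =====
-- one iteration of A's for-loop; state = (height, max_height, previous_char, delta)
def aStep (st : Int × Int × String × Int) (c : Char) : Int × Int × String × Int :=
  let d' : Int := if String.ofList [c] = st.2.2.1 then st.2.2.2 + 1 else 1
  let h' : Int := if c = '^' then st.1 + d' else st.1 - d'
  (h', max h' st.2.1, String.ofList [c], d')

def get_non_linear_max_height (rc : String) : Int :=
  (rc.toList.foldl aStep (0, 0, "", 0)).2.1

-- ===== PORT B =====
-- B's outer while-loop; the inner while-scan for the run end is the takeWhile/dropWhile split
def altGo (l : List Char) (h m : Int) : Int :=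
  match l with
  | [] => m
  | c :: cs =>
    let runLen : Nat := (cs.takeWhile (fun x => x == c)).length
    let rest := cs.dropWhile (fun x => x == c)
    let L : Int := (runLen : Int) + 1
    let T : Int := PySem.Int.floordiv (L * (L + 1)) 2
    if c = '^' then altGo rest (h + T) (max m (h + T))
    else altGo rest (h - T) (max m (h - 1))
termination_by l.length
decreasing_by
  all_goals
    simp only [List.length_cons]
    exact Nat.lt_succ_of_le (List.length_dropWhile_le _ _)

def get_non_linear_max_height_alt (rc : String) : Int := altGo rc.toList 0 0

-- ===== PRECONDITION & SPEC =====
def Spec_get_non_linear_max_height (rc : String) (out : Int) : Prop := out = get_non_linear_max_height_alt rc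
instance (rc : String) (out : Int) : Decidable (Spec_get_non_linear_max_height rc out) := by unfold Spec_get_non_linear_max_height; infer_instance

-- ===== CLAIM (what is proved, stated in full; the proofs are below) =====
def Claim_equal_get_non_linear_max_height : Prop := ∀ (rc : String), Dom_get_non_linear_max_height rc → Spec_get_non_linear_max_height rc (get_non_linear_max_height rc)

-- ===== LEMMAS AND PROOFS =====

-- triangular number 1 + 2 + … + k, as an Int
def triI : Nat → Int
  | 0 => 0
  | k+1 => triI k + (k+1)

theorem two_triI (k : Nat) : 2 * triI k = (k : Int) * (k + 1) := by
  induction k with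
  | zero => simp [triI]
  | succ k ih =>
    simp only [triI]
    push_cast
    linear_combination ih

theorem triI_nonneg (k : Nat) : 0 ≤ triI k := by
  induction k with
  | zero => simp [triI]
  | succ k ih => simp only [triI]; positivity

theorem T_eq_triI (k : Nat) :
    PySem.Int.floordiv (((k : Int) + 1) * ((k : Int) + 1 + 1)) 2 = triI (k + 1) := by
  have h2 : ((k : Int) + 1) * ((k : Int) + 1 + 1) = 2 * triI (k + 1) := by
    have := two_triI (k + 1); push_cast at this ⊢; linarith
  rw [h2, PySem.Int.floordiv_eq_ediv_of_pos (by norm_num)]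
  exact Int.mul_ediv_cancel_left _ (by norm_num)

theorem mk_singleton_ne {a b : Char} (hab : a ≠ b) : String.ofList [a] ≠ String.ofList [b] := by
  intro h
  have h2 := congrArg String.toList h
  rw [String.toList_ofList, String.toList_ofList] at h2
  exact hab (List.singleton_injective h2)

-- A's loop over a run of '^' (previous_char already '^'): heights climb monotonically
theorem foldl_up (k : Nat) : ∀ (h m d : Int), 0 ≤ d → h ≤ m →
    List.foldl aStep (h, m, String.ofList ['^'], d) (List.replicate k '^') =
      (h + k * d + triI k, max (h + k * d + triI k) m, String.ofList ['^'], d + k) := by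
  induction k with
  | zero =>
    intro h m d _ hm
    simp [triI, max_eq_right hm]
  | succ k ih =>
    intro h m d hd hm
    rw [List.replicate_succ, List.foldl_cons]
    have hstep : aStep (h, m, String.ofList ['^'], d) '^' =
        (h + (d + 1), max (h + (d + 1)) m, String.ofList ['^'], d + 1) := by
      simp [aStep]
    rw [hstep, ih (h + (d + 1)) (max (h + (d + 1)) m) (d + 1) (by omega) (le_max_left _ _)]
    have htri := triI_nonneg k
    have hle : h + (d + 1) ≤ h + (d + 1) + k * (d + 1) + triI k := by
      have := mul_nonneg (Int.natCast_nonneg k) (show (0:Int) ≤ d + 1 by omega)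
      linarith
    have hmax : max (h + (d + 1) + k * (d + 1) + triI k) (max (h + (d + 1)) m)
        = max (h + (d + 1) + k * (d + 1) + triI k) m := by
      rw [← max_assoc, max_eq_left hle]
    rw [hmax]
    have harith : h + (d + 1) + k * (d + 1) + triI k = h + (k + 1 : Nat) * d + triI (k + 1) := by
      simp only [triI]; push_cast; ring
    rw [harith]
    refine Prod.ext rfl (Prod.ext rfl (Prod.ext rfl ?_))
    push_cast; ring

-- A's loop over a run of a non-'^' character: heights fall, max_height is untouched
theorem foldl_down (k : Nat) : ∀ (c : Char), c ≠ '^' → ∀ (h m d : Int), 0 ≤ d → h ≤ m →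
    List.foldl aStep (h, m, String.ofList [c], d) (List.replicate k c) =
      (h - (k * d + triI k), m, String.ofList [c], d + k) := by
  induction k with
  | zero =>
    intro c _ h m d _ _
    simp [triI]
  | succ k ih =>
    intro c hc h m d hd hm
    rw [List.replicate_succ, List.foldl_cons]
    have hstep : aStep (h, m, String.ofList [c], d) c =
        (h - (d + 1), max (h - (d + 1)) m, String.ofList [c], d + 1) := by
      simp [aStep, hc]
    have hmax : max (h - (d + 1)) m = m := max_eq_right (by omega)
    rw [hstep, hmax, ih c hc (h - (d + 1)) m (d + 1) (by omega) (by omega)]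
    have harith : h - (d + 1) - (k * (d + 1) + triI k) = h - ((k + 1 : Nat) * d + triI (k + 1)) := by
      simp only [triI]; push_cast; ring
    rw [harith]
    refine Prod.ext rfl (Prod.ext rfl (Prod.ext rfl ?_))
    push_cast; ring

theorem takeWhile_eq_replicate (c : Char) (cs : List Char) :
    cs.takeWhile (fun x => x == c) = List.replicate (cs.takeWhile (fun x => x == c)).length c := by
  rw [List.eq_replicate_iff]
  exact ⟨rfl, fun b hb => by simpa using List.mem_takeWhile_imp hb⟩

theorem dropWhile_head_ne (c : Char) (cs : List Char) :
    ∀ c', (cs.dropWhile (fun x => x == c)).head? = some c' → c' ≠ c := by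
  induction cs with
  | nil => intro c' h; simp at h
  | cons a as ih =>
    intro c' h
    by_cases hac : a = c
    · rw [List.dropWhile_cons_of_pos (by simp [hac])] at h
      exact ih c' h
    · rw [List.dropWhile_cons_of_neg (by simp [hac])] at h
      simp at h
      subst h; exact hac

theorem main_lemma (n : Nat) : ∀ (cs : List Char), cs.length ≤ n →
    ∀ (h m : Int) (p : String) (d : Int),
    (∀ c', cs.head? = some c' → String.ofList [c'] ≠ p) → h ≤ m →
    (List.foldl aStep (h, m, p, d) cs).2.1 = altGo cs h m := by
  induction n with
  | zero =>
    intro cs hlen h m p d _ _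
    have hnil : cs = [] := List.eq_nil_of_length_eq_zero (Nat.le_zero.mp hlen)
    subst hnil
    simp [altGo]
  | succ n ih =>
    intro cs hlen h m p d hp hm
    match cs with
    | [] => simp [altGo]
    | c :: cs' =>
      have hpc : String.ofList [c] ≠ p := hp c rfl
      set run := cs'.takeWhile (fun x => x == c) with hrun
      set rest := cs'.dropWhile (fun x => x == c) with hrest
      have hsplit : cs' = run ++ rest := (List.takeWhile_append_dropWhile ..).symm
      have hrep : run = List.replicate run.length c := takeWhile_eq_replicate c cs'
      have hrestlen : rest.length ≤ n := by
        have h1 : rest.length ≤ cs'.length := List.length_dropWhile_le _ _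
        simp at hlen; omega
      have hresthead : ∀ c', rest.head? = some c' → String.ofList [c'] ≠ String.ofList [c] :=
        fun c' hc' => mk_singleton_ne (dropWhile_head_ne c cs' c' hc')
      have hT := T_eq_triI run.length
      have htri := triI_nonneg run.length
      have hk : (0:Int) ≤ (run.length : Int) := Int.natCast_nonneg _
      by_cases hc : c = '^'
      · subst hc
        have hRHS : altGo ('^' :: cs') h m =
            altGo rest (h + triI (run.length + 1)) (max m (h + triI (run.length + 1))) := by
          rw [altGo]
          simp only [← hrun, ← hrest, hT]
          simp
        rw [hRHS]
        have hstep : aStep (h, m, p, d) '^' =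
            (h + 1, max (h + 1) m, String.ofList ['^'], 1) := by
          simp [aStep, hpc]
        rw [List.foldl_cons, hstep]
        conv_lhs => rw [hsplit, hrep, List.foldl_append]
        rw [foldl_up run.length (h + 1) (max (h + 1) m) 1 (by omega) (le_max_left _ _)]
        have hle : h + 1 ≤ h + 1 + run.length * 1 + triI run.length := by linarith
        rw [← max_assoc, max_eq_left hle]
        rw [ih rest hrestlen _ _ _ _ hresthead (le_max_left _ _)]
        have h1 : h + 1 + run.length * 1 + triI run.length = h + triI (run.length + 1) := by
          simp only [triI]; ring
        rw [h1, max_comm m]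
      · have hRHS : altGo (c :: cs') h m =
            altGo rest (h - triI (run.length + 1)) (max m (h - 1)) := by
          rw [altGo]
          simp only [← hrun, ← hrest, hT, if_neg hc]

        rw [hRHS]
        have hstep : aStep (h, m, p, d) c =
            (h - 1, max (h - 1) m, String.ofList [c], 1) := by
          simp [aStep, hpc, hc]
        rw [List.foldl_cons, hstep]
        conv_lhs => rw [hsplit, hrep, List.foldl_append]
        rw [foldl_down run.length c hc (h - 1) (max (h - 1) m) 1 (by omega) (le_max_left _ _)]
        rw [ih rest hrestlen _ _ _ _ hresthead
          (le_trans (by linarith [htri, hk] : h - 1 - ((run.length : Int) * 1 + triI run.length) ≤ h - 1)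
            (le_max_left _ _))]
        have h1 : h - 1 - (run.length * 1 + triI run.length) = h - triI (run.length + 1) := by
          simp only [triI]; ring
        rw [h1, max_comm m]

-- ===== VERDICT (by name: the statement is the Claim_ definition above) =====
theorem get_non_linear_max_height_spec : Claim_equal_get_non_linear_max_height := by
  intro rc _
  unfold Spec_get_non_linear_max_height get_non_linear_max_height get_non_linear_max_height_alt
  exact main_lemma rc.toList.length rc.toList le_rfl 0 0 "" 0
    (fun c' _ => by
      intro hEq
      have := congrArg String.toList hEq
      rw [String.toList_ofList] at this
      simp at this) le_rfl
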